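-- pv_equiv track=rewrite | github.com/decade6666/CRF-Editor | backend/src/services/export_service.py | _compute_merge_spans
-- ===== SOURCE A (Python) =====
-- from typing import Dict, List, Optional, Tuple
--
-- def _compute_merge_spans(N: int, M: int) -> List[int]:
--
--     """将 N 列均分为 M 个 span，前面的 span 优先分配余数列。
--
--
--
--     前置条件：1 <= M <= N。若 M 超出范围，返回 [1] * N 作为安全回退。
--
--     """
--
--     if M <= 0 or M > N:
--
--         return [1] * N
--
--     base = N // M
--
--     extra = N % M
--
--     spans = []
--
--     for i in range(M):
--
--         spans.append(base + (1 if i < extra else 0))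
--
--     return spans
-- ===== SOURCE B (Python) =====
-- def _compute_merge_spans(N: int, M: int):
--     """B: greedy — each span takes the ceiling of remaining/k of the columns
--     still left; no base/extra quotient-remainder precomputation."""
--     if M <= 0 or M > N:
--         return [1] * N
--     spans = []
--     remaining, k = N, M
--     while k > 0:
--         s = -(-remaining // k)  # ceil division
--         spans.append(s)
--         remaining -= s
--         k -= 1
--     return spans
-- ===== Notes on version B (the rewrite author's own statement) =====
-- stated objective: alternative
-- what changed: Replaces A's base/extra precomputation plus index loop by a recursive greedy algorithm: each span takes ceil(remaining/k) of the columns still left and recursion continues on the remainder, so no quotient/remainder split or per-index branch exists at all.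
import Mathlib
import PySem

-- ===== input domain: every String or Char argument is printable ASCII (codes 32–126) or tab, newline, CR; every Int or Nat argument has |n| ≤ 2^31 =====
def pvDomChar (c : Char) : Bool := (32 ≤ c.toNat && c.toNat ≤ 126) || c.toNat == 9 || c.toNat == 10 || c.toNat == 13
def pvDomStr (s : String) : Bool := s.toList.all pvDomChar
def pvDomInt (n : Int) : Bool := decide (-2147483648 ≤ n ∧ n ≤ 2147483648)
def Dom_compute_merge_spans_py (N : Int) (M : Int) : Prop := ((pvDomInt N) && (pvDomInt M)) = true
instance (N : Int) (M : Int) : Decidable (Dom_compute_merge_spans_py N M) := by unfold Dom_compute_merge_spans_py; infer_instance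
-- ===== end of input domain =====

-- B replaces A's base/extra precomputation and index loop by a recursive greedy:
-- each span takes ceil(remaining/k) of the remaining columns; same cost, different algorithm.

-- ===== PORT A =====
def compute_merge_spans_py (N : Int) (M : Int) : List Int :=
  if M ≤ 0 ∨ N < M then PySem.List.pyRepeat [1] N
  else
    let base := PySem.Int.floordiv N M
    let extra := PySem.Int.mod N M
    (PySem.List.pyRange 0 M 1).foldl
      (fun spans i => spans ++ [base + (if i < extra then 1 else 0)]) []

-- ===== PORT B =====
-- Source B's while loop: k spans, each taking ceil(remaining/k) of what is left
def greedy_loop (spans : List Int) (remaining : Int) (k : Int) : List Int :=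
  if _h : k ≤ 0 then spans
  else
    let s := -(PySem.Int.floordiv (-remaining) k)   -- -(-remaining // k) = ceil division
    greedy_loop (spans ++ [s]) (remaining - s) (k - 1)
termination_by k.toNat
decreasing_by omega

def compute_merge_spans_py_alt (N : Int) (M : Int) : List Int :=
  if M ≤ 0 ∨ N < M then PySem.List.pyRepeat [1] N
  else greedy_loop [] N M

-- ===== PRECONDITION & SPEC =====
def Spec_compute_merge_spans_py (N : Int) (M : Int) (out : List Int) : Prop := out = compute_merge_spans_py_alt N M
instance (N : Int) (M : Int) (out : List Int) : Decidable (Spec_compute_merge_spans_py N M out) := by unfold Spec_compute_merge_spans_py; infer_instance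

-- ===== CLAIM (what is proved, stated in full; the proofs are below) =====
def Claim_equal_compute_merge_spans_py : Prop := ∀ (N : Int) (M : Int), Dom_compute_merge_spans_py N M → Spec_compute_merge_spans_py N M (compute_merge_spans_py N M)

-- ===== LEMMAS AND PROOFS =====

-- A's loop over range(M) splits at `extra` into two constant blocks
theorem pv_map_split (base extra M : Int) (h0 : 0 ≤ extra) (hM : extra ≤ M) :
    (PySem.List.pyRange 0 M 1).map (fun i => base + (if i < extra then 1 else 0))
      = List.replicate extra.toNat (base + 1) ++ List.replicate (M - extra).toNat base := by
  rw [PySem.List.pyRange_one_append 0 extra M h0 hM, List.map_append]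
  congr 1
  · rw [List.map_congr_left (g := fun _ => base + 1)
      (by intro i hi; rw [PySem.List.mem_pyRange_one] at hi; simp [hi.2])]
    simp [List.map_const', PySem.List.length_pyRange_one]
  · rw [List.map_congr_left (g := fun _ => base)
      (by intro i hi; rw [PySem.List.mem_pyRange_one] at hi
          simp [if_neg (not_lt.mpr hi.1)])]
    simp [List.map_const', PySem.List.length_pyRange_one]

-- B's greedy loop on base*k + extra appends the same two constant blocks
theorem pv_greedy_eq (k : Nat) : ∀ (spans : List Int) (base extra : Int), 0 ≤ extra → extra ≤ (k : Int) →
    greedy_loop spans (base * k + extra) k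
      = spans ++ (List.replicate extra.toNat (base + 1) ++ List.replicate ((k : Int) - extra).toNat base) := by
  induction k with
  | zero =>
    intro spans base extra h0 hk
    have : extra = 0 := le_antisymm (by exact_mod_cast hk) h0
    subst this
    simp [greedy_loop]
  | succ k ih =>
    intro spans base extra h0 hk
    have hkpos : ¬ ((k + 1 : Int) ≤ 0) := by omega
    rw [greedy_loop]
    simp only [Int.natCast_succ] at *
    rw [dif_neg hkpos]
    by_cases hex : extra = 0
    · subst hex
      have hs : -(PySem.Int.floordiv (-(base * (k + 1) + 0)) (k + 1)) = base := by
        rw [PySem.Int.neg_floordiv_neg_eq_iff_of_pos (show (0:Int) < (k:Int)+1 by omega)]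
        constructor
        · nlinarith [Int.natCast_nonneg k]
        · omega
      rw [hs]
      have harg : base * ((k : Int) + 1) + 0 - base = base * k + 0 := by ring
      have hk1 : (k:Int) + 1 - 1 = (k:Int) := by ring
      rw [hk1, harg, ih (spans ++ [base]) base 0 le_rfl (by exact_mod_cast Int.natCast_nonneg k)]
      have h1 : ((k : Int) + 1 - 0).toNat = ((k : Int) - 0).toNat + 1 := by omega
      rw [h1, List.replicate_succ]
      simp
    · have hexpos : 0 < extra := lt_of_le_of_ne h0 (Ne.symm hex)
      have hs : -(PySem.Int.floordiv (-(base * (k + 1) + extra)) (k + 1)) = base + 1 := by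
        rw [PySem.Int.neg_floordiv_neg_eq_iff_of_pos (show (0:Int) < (k:Int)+1 by omega)]
        constructor
        · nlinarith [Int.natCast_nonneg k]
        · nlinarith [Int.natCast_nonneg k]
      rw [hs]
      have harg : base * ((k : Int) + 1) + extra - (base + 1) = base * k + (extra - 1) := by ring
      have hk1 : (k:Int) + 1 - 1 = (k:Int) := by ring
      rw [hk1, harg, ih (spans ++ [base + 1]) base (extra - 1) (by omega) (by omega)]
      have h1 : extra.toNat = (extra - 1).toNat + 1 := by omega
      have h2 : ((k : Int) - (extra - 1)).toNat = ((k : Int) + 1 - extra).toNat := by omega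
      rw [h1, h2, List.replicate_succ]
      simp

-- ===== VERDICT (by name: the statement is the Claim_ definition above) =====
theorem compute_merge_spans_py_spec : Claim_equal_compute_merge_spans_py := by
  intro N M _
  unfold Spec_compute_merge_spans_py compute_merge_spans_py compute_merge_spans_py_alt
  split
  · rfl
  · rename_i h
    push Not at h
    have hM : 0 < M := h.1
    set base := PySem.Int.floordiv N M with hbase
    set extra := PySem.Int.mod N M with hextra
    have hid : base * M + extra = N := PySem.Int.floordiv_mul_add_mod N M
    have hMk : ((M.toNat : Int)) = M := Int.toNat_of_nonneg (le_of_lt hM)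
    rw [PySem.List.foldl_append_singleton_eq_map, List.nil_append]
    rw [pv_map_split base extra M (PySem.Int.mod_nonneg N hM) (le_of_lt (PySem.Int.mod_lt N hM))]
    have := pv_greedy_eq M.toNat [] base extra (PySem.Int.mod_nonneg N hM)
      (by rw [hMk]; exact le_of_lt (PySem.Int.mod_lt N hM))
    rw [hMk, hid] at this
    rw [this, List.nil_append]
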